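-- pv_equiv track=rewrite | github.com/dcille/ARCA | api/routers/mitre.py | _filter_check_to_mitre
-- ===== SOURCE A (Python) =====
-- FRAMEWORK_PREFIXES = {
--     "azure_cis_": "CIS Azure v5.0",
--     "aws_cis_": "CIS AWS v6.0",
--     "gcp_cis_": "CIS GCP v4.0",
--     "oci_cis_": "CIS OCI v3.1",
--     "alibaba_cis_": "CIS Alibaba v2.0",
--     "ibm_cis_": "CIS IBM Cloud v2.0",
--     "m365_cis_": "CIS M365 v6.0.1",
--     "gws_cis_": "CIS Google Workspace v1.3.0",
--     "sf_cis_": "CIS Snowflake v1.0.0",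
-- }
--
-- def _filter_check_to_mitre(check_to_mitre: dict, frameworks: list[str] | None) -> dict:
--     """Filter CHECK_TO_MITRE to only include entries matching selected frameworks.
--
--     If frameworks is None or empty, returns all entries (no filtering).
--     """
--     if not frameworks:
--         return check_to_mitre
--
--     # Build set of allowed prefixes from selected framework labels
--     allowed_prefixes = set()
--     for prefix, label in FRAMEWORK_PREFIXES.items():
--         if label in frameworks:
--             allowed_prefixes.add(prefix)
--
--     if not allowed_prefixes:
--         return check_to_mitre
--
--     # Keep entries that match an allowed prefix OR are non-CIS check_ids
--     filtered = {}
--     for check_id, techs in check_to_mitre.items():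
--         is_cis = any(check_id.startswith(p) for p in FRAMEWORK_PREFIXES)
--         if not is_cis:
--             # Non-CIS scanner check_ids (e.g. iam_root_mfa_enabled) — always include
--             filtered[check_id] = techs
--         elif any(check_id.startswith(p) for p in allowed_prefixes):
--             filtered[check_id] = techs
--     return filtered
-- ===== SOURCE B (Python) =====
-- FRAMEWORK_PREFIXES = {
--     "azure_cis_": "CIS Azure v5.0",
--     "aws_cis_": "CIS AWS v6.0",
--     "gcp_cis_": "CIS GCP v4.0",
--     "oci_cis_": "CIS OCI v3.1",
--     "alibaba_cis_": "CIS Alibaba v2.0",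
--     "ibm_cis_": "CIS IBM Cloud v2.0",
--     "m365_cis_": "CIS M365 v6.0.1",
--     "gws_cis_": "CIS Google Workspace v1.3.0",
--     "sf_cis_": "CIS Snowflake v1.0.0",
-- }
--
--
-- def _filter_check_to_mitre(check_to_mitre: dict, frameworks: "list[str] | None") -> dict:
--     """Filter CHECK_TO_MITRE to only include entries matching selected frameworks.
--
--     Prefix-major strategy: for each framework NOT selected, scan the keys once
--     and record the check_ids to drop; then rebuild the dict excluding them.
--     Correct because no framework prefix is a prefix of another, so a check_id
--     matches at most one prefix (an id kept for an allowed prefix can never be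
--     recorded for a disallowed one).
--     """
--     if not frameworks:
--         return check_to_mitre
--     if not any(label in frameworks for label in FRAMEWORK_PREFIXES.values()):
--         return check_to_mitre
--
--     drop = set()
--     for prefix, label in FRAMEWORK_PREFIXES.items():
--         if label not in frameworks:
--             for check_id in check_to_mitre:
--                 if check_id.startswith(prefix):
--                     drop.add(check_id)
--
--     return {k: v for k, v in check_to_mitre.items() if k not in drop}
-- ===== Notes on version B (the rewrite author's own statement) =====
-- stated objective: alternative
-- what changed: B inverts the loop nesting: instead of A's per-entry pass running two any()-scans over the prefix table, B loops prefix-major over the NON-selected frameworks, scanning the keys once per disallowed prefix to build a drop set of check_ids, then rebuilds the dict by a plain key-membership test; correct because the framework prefixes are pairwise non-overlapping.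
import Mathlib
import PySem

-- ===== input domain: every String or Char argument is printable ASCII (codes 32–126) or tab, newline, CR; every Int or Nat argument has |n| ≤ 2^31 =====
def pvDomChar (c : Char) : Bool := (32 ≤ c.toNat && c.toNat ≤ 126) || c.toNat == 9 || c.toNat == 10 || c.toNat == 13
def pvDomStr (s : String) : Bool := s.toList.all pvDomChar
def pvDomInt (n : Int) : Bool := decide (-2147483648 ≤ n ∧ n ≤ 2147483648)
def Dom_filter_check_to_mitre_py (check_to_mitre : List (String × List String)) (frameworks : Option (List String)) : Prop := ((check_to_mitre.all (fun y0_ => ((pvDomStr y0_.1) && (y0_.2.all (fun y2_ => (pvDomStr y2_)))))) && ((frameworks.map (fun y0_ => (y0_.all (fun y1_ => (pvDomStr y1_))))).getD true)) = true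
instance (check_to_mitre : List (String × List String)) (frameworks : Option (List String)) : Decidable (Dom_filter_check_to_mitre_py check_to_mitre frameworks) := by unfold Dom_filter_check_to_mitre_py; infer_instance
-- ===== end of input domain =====

-- B inverts the loop nesting: for each NON-selected framework it scans the keys once,
-- collecting the check_ids to drop, then rebuilds the dict by key membership in that
-- drop set — instead of A's per-entry two any()-scans over the prefixes; objective: alternative.

-- FRAMEWORK_PREFIXES, a module-level literal dict (insertion order)
def pvPrefixLabels : List (String × String) :=
  [("azure_cis_", "CIS Azure v5.0"),
   ("aws_cis_", "CIS AWS v6.0"),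
   ("gcp_cis_", "CIS GCP v4.0"),
   ("oci_cis_", "CIS OCI v3.1"),
   ("alibaba_cis_", "CIS Alibaba v2.0"),
   ("ibm_cis_", "CIS IBM Cloud v2.0"),
   ("m365_cis_", "CIS M365 v6.0.1"),
   ("gws_cis_", "CIS Google Workspace v1.3.0"),
   ("sf_cis_", "CIS Snowflake v1.0.0")]

-- ===== PORT A =====
def filter_check_to_mitre_py (check_to_mitre : List (String × List String)) (frameworks : Option (List String)) : List (String × List String) :=
  match frameworks with
  | none => check_to_mitre
  | some fs =>
    if fs.isEmpty then check_to_mitre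
    else
      -- allowed_prefixes built by the loop over FRAMEWORK_PREFIXES.items()
      let allowed : PySem.Set String :=
        pvPrefixLabels.foldl
          (fun acc pl => if pl.2 ∈ fs then PySem.Set.add acc pl.1 else acc)
          PySem.Set.empty
      if allowed.isEmpty then check_to_mitre
      else
        check_to_mitre.foldl
          (fun acc kt =>
            let isCis := pvPrefixLabels.any (fun pl => PySem.Str.startswith kt.1 pl.1)
            if !isCis then acc ++ [kt]
            else if allowed.any (fun p => PySem.Str.startswith kt.1 p) then acc ++ [kt]
            else acc)
          []

-- ===== PORT B =====
def filter_check_to_mitre_py_alt (check_to_mitre : List (String × List String)) (frameworks : Option (List String)) : List (String × List String) :=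
  match frameworks with
  | none => check_to_mitre
  | some fs =>
    if fs.isEmpty then check_to_mitre
    else if !((pvPrefixLabels.map Prod.snd).any (fun l => l ∈ fs)) then check_to_mitre
    else
      -- prefix-major: for each non-selected framework, scan the keys and record drops
      let drop : PySem.Set String :=
        pvPrefixLabels.foldl
          (fun acc pl =>
            if pl.2 ∈ fs then acc
            else (check_to_mitre.map Prod.fst).foldl
              (fun a k => if PySem.Str.startswith k pl.1 then PySem.Set.add a k else a)
              acc)
          PySem.Set.empty
      check_to_mitre.filter (fun kt => !(PySem.Set.contains drop kt.1))

-- ===== PRECONDITION & SPEC =====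
def Spec_filter_check_to_mitre_py (check_to_mitre : List (String × List String)) (frameworks : Option (List String)) (out : List (String × List String)) : Prop := out = filter_check_to_mitre_py_alt check_to_mitre frameworks
instance (check_to_mitre : List (String × List String)) (frameworks : Option (List String)) (out : List (String × List String)) : Decidable (Spec_filter_check_to_mitre_py check_to_mitre frameworks out) := by unfold Spec_filter_check_to_mitre_py; infer_instance

-- ===== CLAIM (what is proved, stated in full; the proofs are below) =====
def Claim_equal_filter_check_to_mitre_py : Prop := ∀ (check_to_mitre : List (String × List String)) (frameworks : Option (List String)), Dom_filter_check_to_mitre_py check_to_mitre frameworks → Spec_filter_check_to_mitre_py check_to_mitre frameworks (filter_check_to_mitre_py check_to_mitre frameworks)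

-- ===== LEMMAS AND PROOFS =====

-- A's conditional-add loop builds exactly the set of allowed prefixes
theorem pv_allowed_eq (fs : List String) (l : List (String × String)) (s : PySem.Set String) :
    l.foldl (fun acc pl => if pl.2 ∈ fs then PySem.Set.add acc pl.1 else acc) s
      = ((l.filter (fun pl => pl.2 ∈ fs)).map Prod.fst).foldl PySem.Set.add s := by
  induction l generalizing s with
  | nil => rfl
  | cons hd tl ih =>
    by_cases h : hd.2 ∈ fs <;> simp [List.foldl, h, ih]

-- membership in the inner per-prefix key scan of B
theorem pv_mem_inner (P : String → Bool) (ks : List String) (acc : List String) (x : String) :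
    x ∈ ks.foldl (fun a k => if P k then PySem.Set.add a k else a) acc
      ↔ x ∈ acc ∨ (x ∈ ks ∧ P x = true) := by
  induction ks generalizing acc with
  | nil => simp
  | cons hd tl ih =>
    by_cases h : P hd = true
    · simp only [List.foldl_cons, if_pos h, ih, PySem.Set.mem_add, List.mem_cons]
      constructor
      · rintro ((hx | rfl) | ⟨hx, hp⟩)
        · exact .inl hx
        · exact .inr ⟨.inl rfl, h⟩
        · exact .inr ⟨.inr hx, hp⟩
      · rintro (hx | ⟨(rfl | hx), hp⟩)
        · exact .inl (.inl hx)
        · exact .inl (.inr rfl)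
        · exact .inr ⟨hx, hp⟩
    · simp only [List.foldl_cons, if_neg h, ih, List.mem_cons]
      constructor
      · rintro (hx | ⟨hx, hp⟩)
        · exact .inl hx
        · exact .inr ⟨.inr hx, hp⟩
      · rintro (hx | ⟨(rfl | hx), hp⟩)
        · exact .inl hx
        · exact absurd hp h
        · exact .inr ⟨hx, hp⟩

-- membership in B's drop set
theorem pv_mem_drop (fs : List String) (l : List (String × String)) (ks : List String)
    (acc : List String) (x : String) :
    x ∈ l.foldl
        (fun acc pl =>
          if pl.2 ∈ fs then acc
          else ks.foldl (fun a k => if PySem.Str.startswith k pl.1 then PySem.Set.add a k else a) acc)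
        acc
      ↔ x ∈ acc ∨ ∃ pl ∈ l, pl.2 ∉ fs ∧ x ∈ ks ∧ PySem.Str.startswith x pl.1 = true := by
  induction l generalizing acc with
  | nil => simp
  | cons hd tl ih =>
    by_cases h : hd.2 ∈ fs
    · simp only [List.foldl_cons, if_pos h, ih, List.mem_cons]
      constructor
      · rintro (hx | ⟨pl, hpl, hrest⟩)
        · exact .inl hx
        · exact .inr ⟨pl, .inr hpl, hrest⟩
      · rintro (hx | ⟨pl, (rfl | hpl), hn, hrest⟩)
        · exact .inl hx
        · exact absurd h hn
        · exact .inr ⟨pl, hpl, hn, hrest⟩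
    · simp only [List.foldl_cons, if_neg h, ih, pv_mem_inner, List.mem_cons]
      constructor
      · rintro ((hx | ⟨hk, hp⟩) | ⟨pl, hpl, hrest⟩)
        · exact .inl hx
        · exact .inr ⟨hd, .inl rfl, h, hk, hp⟩
        · exact .inr ⟨pl, .inr hpl, hrest⟩
      · rintro (hx | ⟨pl, (rfl | hpl), hn, hk, hp⟩)
        · exact .inl (.inl hx)
        · exact .inl (.inr ⟨hk, hp⟩)
        · exact .inr ⟨pl, hpl, hn, hk, hp⟩

-- the nine prefixes are pairwise prefix-incomparable, so an id matches at most one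
theorem pv_unique_prefix (cid : String) (p q : String × String)
    (hp : p ∈ pvPrefixLabels) (hq : q ∈ pvPrefixLabels)
    (hbp : PySem.Str.startswith cid p.1 = true) (hbq : PySem.Str.startswith cid q.1 = true) :
    p = q := by
  have hp' : p.1.toList <+: cid.toList := by
    rw [PySem.Str.startswith_eq, PySem.Chars.startswith_iff] at hbp; exact hbp
  have hq' : q.1.toList <+: cid.toList := by
    rw [PySem.Str.startswith_eq, PySem.Chars.startswith_iff] at hbq; exact hbq
  have hcmp : p.1.toList <+: q.1.toList ∨ q.1.toList <+: p.1.toList :=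
    List.prefix_or_prefix_of_prefix hp' hq'
  have hkey : ∀ x ∈ pvPrefixLabels, ∀ y ∈ pvPrefixLabels,
      x.1.toList <+: y.1.toList → x = y := by decide
  rcases hcmp with h | h
  · exact hkey p hp q hq h
  · exact (hkey q hq p hp h).symm

-- per-entry (for a key occurring in the dict): A's keep test equals B's
theorem pv_keep_eq (fs : List String) (c : List (String × List String)) (cid : String)
    (hcid : cid ∈ c.map Prod.fst) :
    (!(pvPrefixLabels.any (fun pl => PySem.Str.startswith cid pl.1))
      || ((pvPrefixLabels.foldl
            (fun acc pl => if pl.2 ∈ fs then PySem.Set.add acc pl.1 else acc)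
            PySem.Set.empty).any (fun p => PySem.Str.startswith cid p)))
    = !(PySem.Set.contains
          (pvPrefixLabels.foldl
            (fun acc pl =>
              if pl.2 ∈ fs then acc
              else (c.map Prod.fst).foldl
                (fun a k => if PySem.Str.startswith k pl.1 then PySem.Set.add a k else a) acc)
            PySem.Set.empty)
          cid) := by
  rw [pv_allowed_eq, show (PySem.Set.empty : PySem.Set String) = [] from rfl,
    ← PySem.Set.ofList_eq_foldl]
  generalize hdd : pvPrefixLabels.foldl
      (fun acc pl =>
        if pl.2 ∈ fs then acc
        else (c.map Prod.fst).foldl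
          (fun a k => if PySem.Str.startswith k pl.1 then PySem.Set.add a k else a) acc)
      ([] : PySem.Set String) = drop
  have hdrop : ∀ x : String, PySem.Set.contains drop x = true
      ↔ ∃ pl ∈ pvPrefixLabels, pl.2 ∉ fs ∧ x ∈ c.map Prod.fst ∧ PySem.Str.startswith x pl.1 = true := by
    intro x
    rw [← hdd, PySem.Set.contains_iff, pv_mem_drop]
    simp
  cases hA : (pvPrefixLabels.any fun pl => PySem.Str.startswith cid pl.1) with
  | false =>
    have hnc : PySem.Set.contains drop cid = false := by
      rw [Bool.eq_false_iff]
      intro hc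
      rcases (hdrop cid).mp hc with ⟨pl, hpl, _, _, hq⟩
      rw [List.any_eq_false] at hA
      exact hA pl hpl hq
    rw [hnc]; rfl
  | true =>
    simp only [Bool.not_true, Bool.false_or]
    cases hB : ((PySem.Set.ofList ((pvPrefixLabels.filter (fun pl => pl.2 ∈ fs)).map Prod.fst)).any
        fun p => PySem.Str.startswith cid p) with
    | true =>
      rcases List.any_eq_true.mp hB with ⟨p, hp, hbp⟩
      rw [PySem.Set.mem_ofList] at hp
      rcases List.mem_map.mp hp with ⟨pl, hplf, rfl⟩
      rcases List.mem_filter.mp hplf with ⟨hpl, hin⟩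
      have hnc : PySem.Set.contains drop cid = false := by
        rw [Bool.eq_false_iff]
        intro hc
        rcases (hdrop cid).mp hc with ⟨ql, hql, hqn, _, hq⟩
        have heq := pv_unique_prefix cid pl ql hpl hql hbp hq
        subst heq
        exact hqn (by simpa using hin)
      rw [hnc]; rfl
    | false =>
      rcases List.any_eq_true.mp hA with ⟨pl, hpl, hb⟩
      have hnin : pl.2 ∉ fs := by
        intro hin
        rw [List.any_eq_false] at hB
        have hm : pl.1 ∈ (PySem.Set.ofList
            ((pvPrefixLabels.filter (fun pl => pl.2 ∈ fs)).map Prod.fst) : List String) := by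
          rw [PySem.Set.mem_ofList]
          exact List.mem_map.mpr ⟨pl, List.mem_filter.mpr ⟨hpl, by simpa using hin⟩, rfl⟩
        exact hB pl.1 hm hb
      have hc : PySem.Set.contains drop cid = true :=
        (hdrop cid).mpr ⟨pl, hpl, hnin, hcid, hb⟩
      rw [hc]; rfl

-- the two "nothing selected" guards agree
theorem pv_guard_eq (fs : List String) :
    (pvPrefixLabels.foldl
        (fun acc pl => if pl.2 ∈ fs then PySem.Set.add acc pl.1 else acc)
        PySem.Set.empty).isEmpty
      = !((pvPrefixLabels.map Prod.snd).any (fun l => l ∈ fs)) := by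
  rw [pv_allowed_eq, show (PySem.Set.empty : PySem.Set String) = [] from rfl,
    ← PySem.Set.ofList_eq_foldl, Bool.eq_iff_iff]
  simp only [List.isEmpty_iff, Bool.not_eq_true', List.any_eq_false, List.mem_map,
    List.isEmpty_iff]
  constructor
  · intro h l ⟨pl, hpl, hsnd⟩
    by_cases hin : pl.2 ∈ fs
    · exfalso
      have : pl.1 ∈ (PySem.Set.ofList ((pvPrefixLabels.filter (fun pl => pl.2 ∈ fs)).map Prod.fst) : List String) := by
        rw [PySem.Set.mem_ofList]
        exact List.mem_map.mpr ⟨pl, List.mem_filter.mpr ⟨hpl, by simpa using hin⟩, rfl⟩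
      rw [h] at this; cases this
    · subst hsnd; simpa using hin
  · intro h
    have hf : pvPrefixLabels.filter (fun pl => pl.2 ∈ fs) = [] := by
      rw [List.filter_eq_nil_iff]
      intro pl hpl
      have := h pl.2 ⟨pl, hpl, rfl⟩
      simpa using this
    rw [hf]; rfl

-- A's accumulate-loop with its two nested tests equals a filter by any pointwise-equal keep test
theorem pv_loop_eq {α : Type} (l : List α) (acc : List α) (f g keep : α → Bool)
    (h : ∀ x ∈ l, (!(f x) || g x) = keep x) :
    l.foldl (fun acc x => if !(f x) then acc ++ [x] else if g x then acc ++ [x] else acc) acc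
      = acc ++ l.filter keep := by
  induction l generalizing acc with
  | nil => simp
  | cons hd tl ih =>
    have hk := h hd List.mem_cons_self
    have htl : ∀ x ∈ tl, (!(f x) || g x) = keep x := fun x hx => h x (List.mem_cons_of_mem _ hx)
    rw [List.foldl_cons, List.filter_cons]
    cases hf : f hd with
    | false =>
      have hkeep : keep hd = true := by rw [← hk, hf]; rfl
      simp only [hkeep, Bool.not_false, ite_true]
      rw [ih _ htl]
      simp
    | true =>
      cases hg : g hd with
      | true =>
        have hkeep : keep hd = true := by rw [← hk, hf, hg]; rfl
        simp only [hkeep, Bool.not_true, Bool.false_eq_true, ite_true, ite_false]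
        rw [ih _ htl]
        simp
      | false =>
        have hkeep : keep hd = false := by rw [← hk, hf, hg]; rfl
        simp only [hkeep, Bool.not_true, Bool.false_eq_true, ite_false]
        rw [ih _ htl]

theorem filter_check_to_mitre_py_spec : Claim_equal_filter_check_to_mitre_py := by
  intro c fw _
  unfold Spec_filter_check_to_mitre_py filter_check_to_mitre_py filter_check_to_mitre_py_alt
  cases fw with
  | none => rfl
  | some fs =>
    by_cases hfs : fs.isEmpty
    · simp [hfs]
    · simp only [hfs, Bool.false_eq_true, if_false]
      rw [pv_guard_eq fs]
      by_cases hA : (pvPrefixLabels.map Prod.snd).any (fun l => l ∈ fs)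
      · simp only [hA, Bool.not_true, Bool.false_eq_true, if_false]
        exact pv_loop_eq c [] _ _ _
          (fun kt hkt => pv_keep_eq fs c kt.1 (List.mem_map.mpr ⟨kt, hkt, rfl⟩))
      · simp [hA]
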